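-- pv_equiv track=rewrite | github.com/kpj2006/skill-updater | skill_patcher.py | _find_primary
-- ===== SOURCE A (Python) =====
-- def _find_primary(files: dict[str, str]) -> str | None:
--     """Return the relative path of the primary skill.md, or None if not found."""
--     candidates = ["skill.md", "aossie_template.md"]
--     for name in files:
--         if name.lower() in candidates or name.lower().endswith("/skill.md"):
--             return name
--     # Fallback: first .md file alphabetically
--     for name in sorted(files):
--         if name.lower().endswith(".md"):
--             return name
--     return None
-- ===== SOURCE B (Python) =====
-- def _find_primary(files):
--     """Return the relative path of the primary skill.md, or None if not found."""
--     candidates = ["skill.md", "aossie_template.md"]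
--     best = None
--     for name in files:
--         low = name.lower()
--         if low in candidates or low.endswith("/skill.md"):
--             return name
--         if low.endswith(".md") and (best is None or name < best):
--             best = name
--     return best
-- ===== Notes on version B (the rewrite author's own statement) =====
-- stated objective: faster
-- what changed: Single pass: returns immediately on a priority name and otherwise keeps a running alphabetical minimum of .md names, replacing A's second sorted-scan fallback.
import Mathlib
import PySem

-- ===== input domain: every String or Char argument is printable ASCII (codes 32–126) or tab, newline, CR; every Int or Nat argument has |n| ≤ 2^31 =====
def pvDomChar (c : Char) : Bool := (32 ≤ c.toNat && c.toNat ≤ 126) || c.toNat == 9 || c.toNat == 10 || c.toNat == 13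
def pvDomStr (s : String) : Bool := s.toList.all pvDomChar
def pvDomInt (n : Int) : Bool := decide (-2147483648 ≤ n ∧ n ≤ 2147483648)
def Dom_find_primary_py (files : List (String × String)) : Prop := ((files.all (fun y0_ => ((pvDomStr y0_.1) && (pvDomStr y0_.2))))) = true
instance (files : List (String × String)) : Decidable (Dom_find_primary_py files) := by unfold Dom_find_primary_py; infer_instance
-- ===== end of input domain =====

-- B replaces A's sorted-scan fallback by a single pass that keeps a running
-- alphabetical minimum of .md names (objective: faster — no sort).


-- ===== PORT A =====
-- name.lower() in candidates or name.lower().endswith("/skill.md")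
def pvPri (name : String) : Bool :=
  (["skill.md", "aossie_template.md"].contains (PySem.Str.lower name))
    || PySem.Str.endswith (PySem.Str.lower name) "/skill.md"

-- name.lower().endswith(".md")
def pvIsMd (name : String) : Bool :=
  PySem.Str.endswith (PySem.Str.lower name) ".md"

def find_primary_py (files : List (String × String)) : Option String :=
  -- iterating a dict yields its distinct keys in first-insertion order
  let names := PySem.List.dedup (files.map Prod.fst)
  match names.find? pvPri with
  | some n => some n
  | none => (PySem.List.sorted names (fun x => x) false).find? pvIsMd

-- ===== PORT B =====
-- best is None or name < best
def pvLess (best : Option String) (n : String) : Bool :=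
  match best with
  | none => true
  | some b => decide (n < b)

def pvBLoop : List String → Option String → Option String
  | [], best => best
  | n :: t, best =>
    if pvPri n then some n
    else if pvIsMd n && pvLess best n then pvBLoop t (some n)
    else pvBLoop t best

def find_primary_py_alt (files : List (String × String)) : Option String :=
  pvBLoop (PySem.List.dedup (files.map Prod.fst)) none

-- ===== PRECONDITION & SPEC =====
def Spec_find_primary_py (files : List (String × String)) (out : Option String) : Prop := out = find_primary_py_alt files
instance (files : List (String × String)) (out : Option String) : Decidable (Spec_find_primary_py files out) := by unfold Spec_find_primary_py; infer_instance

-- ===== CLAIM (what is proved, stated in full; the proofs are below) =====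
def Claim_equal_find_primary_py : Prop := ∀ (files : List (String × String)), Dom_find_primary_py files → Spec_find_primary_py files (find_primary_py files)

-- ===== LEMMAS AND PROOFS =====

-- combine step of B's running minimum, as an Option fold
def pvCombine (best : Option String) (n : String) : Option String :=
  match best with
  | none => some n
  | some b => some (if n < b then n else b)

theorem pvCombine_eq_min (b n : String) : pvCombine (some b) n = some (min b n) := by
  simp only [pvCombine, min_def]
  by_cases h : n < b
  · rw [if_pos h, if_neg (not_le.mpr h)]
  · rw [if_neg h, if_pos (le_of_not_gt h)]

-- B's loop, when no priority name occurs, folds pvCombine over the .md names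
theorem pvBLoop_no_pri (ns : List String) (best : Option String)
    (h : ns.find? pvPri = none) :
    pvBLoop ns best = (ns.filter pvIsMd).foldl pvCombine best := by
  induction ns generalizing best with
  | nil => rfl
  | cons n t ih =>
    rw [List.find?_cons] at h
    cases hp : pvPri n with
    | true => rw [hp] at h; exact absurd h (by simp)
    | false =>
      rw [hp] at h
      have h' : t.find? pvPri = none := h
      have hgoal : pvBLoop (n :: t) best =
          (if (pvIsMd n && pvLess best n) = true then pvBLoop t (some n)
           else pvBLoop t best) := by
        simp only [pvBLoop, hp, Bool.false_eq_true, if_false]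
      rw [hgoal, List.filter_cons]
      cases hm : pvIsMd n with
      | false =>
        rw [Bool.false_and, if_neg (by simp), if_neg (by simp)]
        exact ih best h'
      | true =>
        rw [Bool.true_and, if_pos rfl, List.foldl_cons]
        cases best with
        | none =>
          rw [if_pos (show pvLess none n = true from rfl)]
          exact ih (some n) h'
        | some b =>
          by_cases hlt : n < b
          · rw [if_pos (show pvLess (some b) n = true from decide_eq_true hlt),
              pvCombine_eq_min, min_eq_right (le_of_lt hlt)]
            exact ih (some n) h'
          · rw [if_neg (show ¬ pvLess (some b) n = true from by
                simp [pvLess, hlt]), pvCombine_eq_min, min_eq_left (le_of_not_gt hlt)]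
            exact ih (some b) h'

-- B's loop returns the first priority name when one exists
theorem pvBLoop_pri (ns : List String) (best : Option String) (n : String)
    (h : ns.find? pvPri = some n) : pvBLoop ns best = some n := by
  induction ns generalizing best with
  | nil => exact absurd h (by simp)
  | cons x t ih =>
    rw [List.find?_cons] at h
    cases hp : pvPri x with
    | true =>
      rw [hp] at h
      have h' : some x = some n := h
      injection h' with h'
      subst h'
      simp [pvBLoop, hp]
    | false =>
      rw [hp] at h
      have h' : t.find? pvPri = some n := h
      have hgoal : pvBLoop (x :: t) best =
          (if (pvIsMd x && pvLess best x) = true then pvBLoop t (some x)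
           else pvBLoop t best) := by
        simp only [pvBLoop, hp, Bool.false_eq_true, if_false]
      rw [hgoal]
      by_cases hc : (pvIsMd x && pvLess best x) = true
      · rw [if_pos hc]; exact ih (some x) h'
      · rw [if_neg hc]; exact ih best h'

-- first match of a scan is the head of the filtered list
theorem pvFind?_eq_head?_filter (p : String → Bool) (l : List String) :
    l.find? p = (l.filter p).head? := by
  induction l with
  | nil => rfl
  | cons x t ih =>
    rw [List.find?_cons, List.filter_cons]
    cases h : p x with
    | true => rfl
    | false => exact ih

-- folding pvCombine from none over a nonempty list is min? of the list
theorem pvFoldl_combine_min (x : String) (t : List String) :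
    (x :: t).foldl pvCombine none = PySem.List.min? (x :: t) (fun y => y) := by
  rw [PySem.List.min?_id_cons]
  show t.foldl pvCombine (some x) = some (t.foldl min x)
  induction t generalizing x with
  | nil => rfl
  | cons y s ih => simp only [List.foldl_cons, pvCombine_eq_min]; exact ih (min x y)

-- ===== VERDICT (by name: the statement is the Claim_ definition above) =====
theorem find_primary_py_spec : Claim_equal_find_primary_py := by
  intro files _
  unfold Spec_find_primary_py find_primary_py find_primary_py_alt
  set ns := PySem.List.dedup (files.map Prod.fst) with hns
  cases hf : ns.find? pvPri with
  | some n => simp only [hf]; exact (pvBLoop_pri ns none n hf).symm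
  | none =>
    simp only [hf]
    rw [pvBLoop_no_pri ns none hf, pvFind?_eq_head?_filter]
    have hperm : ((PySem.List.sorted ns (fun x => x) false).filter pvIsMd).Perm
        (ns.filter pvIsMd) := (PySem.List.sorted_perm ns (fun x => x) false).filter _
    have hpw : ((PySem.List.sorted ns (fun x => x) false).filter pvIsMd).Pairwise
        (fun a b => a ≤ b) :=
      (PySem.List.sorted_pairwise ns (fun x => x)).filter pvIsMd
    cases hsf : (PySem.List.sorted ns (fun x => x) false).filter pvIsMd with
    | nil =>
      rw [hsf] at hperm
      rw [List.perm_nil.mp hperm.symm]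
      rfl
    | cons m t =>
      rw [hsf] at hperm hpw
      have hmin1 : ∀ y ∈ ns.filter pvIsMd, m ≤ y := by
        intro y hy
        rcases List.mem_cons.mp (hperm.mem_iff.mpr hy) with he | he
        · exact le_of_eq he.symm
        · exact (List.pairwise_cons.mp hpw).1 y he
      cases hnf : ns.filter pvIsMd with
      | nil => rw [hnf] at hperm; exact absurd hperm (by simp)
      | cons x s =>
        rw [pvFoldl_combine_min]
        cases hmq : PySem.List.min? (x :: s) (fun y => y) with
        | none => exact absurd hmq (by simp [PySem.List.min?_eq_none_iff])
        | some m' =>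
          have hm'mem := PySem.List.min?_mem hmq
          have hm'min := PySem.List.min?_isMin hmq
          have h1 : m ≤ m' := hmin1 m' (hnf ▸ hm'mem)
          have h2 : m' ≤ m := by
            have hm : m ∈ x :: s := hnf ▸ hperm.mem_iff.mp List.mem_cons_self
            exact hm'min m hm
          rw [List.head?_cons, le_antisymm h1 h2]
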